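-- pv_equiv track=rewrite | github.com/zamaraevnikita/chel_nogi_ruki | main.py | calculate_stride
-- ===== SOURCE A (Python) =====
-- def calculate_stride(pos_history):
--     """Расчет длины шага на основе истории позиций"""
--     if len(pos_history) < 5:
--         return None
--
--     # Находим максимальное горизонтальное расстояние между позициями
--     max_dist = 0
--
--     for i in range(len(pos_history)):
--         for j in range(i+1, len(pos_history)):
--             dist = abs(pos_history[i][0] - pos_history[j][0])
--             max_dist = max(max_dist, dist)
--
--     return max_dist
-- ===== SOURCE B (Python) =====
-- def calculate_stride(pos_history):
--     """Расчет длины шага на основе истории позиций"""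
--     if len(pos_history) < 5:
--         return None
--
--     # One linear pass tracking the horizontal extent: max pairwise
--     # absolute difference of x-coordinates equals max_x - min_x.
--     min_x = pos_history[0][0]
--     max_x = pos_history[0][0]
--     for p in pos_history:
--         if p[0] < min_x:
--             min_x = p[0]
--         if p[0] > max_x:
--             max_x = p[0]
--     return max_x - min_x
-- ===== Notes on version B (the rewrite author's own statement) =====
-- stated objective: faster
-- what changed: Replaces the O(n^2) all-pairs nested loop over |x_i - x_j| with a single O(n) pass tracking min and max x, returning max_x - min_x.
import Mathlib
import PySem

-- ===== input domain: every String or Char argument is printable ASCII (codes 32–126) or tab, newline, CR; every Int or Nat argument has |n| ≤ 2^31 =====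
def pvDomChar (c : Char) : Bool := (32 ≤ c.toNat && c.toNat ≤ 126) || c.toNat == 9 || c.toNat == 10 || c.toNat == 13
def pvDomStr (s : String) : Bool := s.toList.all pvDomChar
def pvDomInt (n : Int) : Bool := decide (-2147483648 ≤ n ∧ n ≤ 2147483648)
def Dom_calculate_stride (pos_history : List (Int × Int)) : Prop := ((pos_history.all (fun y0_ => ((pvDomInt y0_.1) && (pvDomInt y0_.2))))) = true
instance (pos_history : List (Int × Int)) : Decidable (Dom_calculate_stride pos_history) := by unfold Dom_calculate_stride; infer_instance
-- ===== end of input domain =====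

-- B replaces A's O(n²) all-pairs scan by one linear pass tracking min/max x (faster).

-- ===== PORT A =====
-- literal port of A: nested index loops over range, maximising |x_i - x_j|
def calculate_stride (pos_history : List (Int × Int)) : Option Int :=
  if pos_history.length < 5 then none
  else
    let max_dist : Int :=
      (PySem.List.pyRange 0 pos_history.length 1).foldl (fun md i =>
        (PySem.List.pyRange (i + 1) pos_history.length 1).foldl (fun md j =>
          max md |(PySem.List.pyGetD pos_history i (0, 0)).1 -
                  (PySem.List.pyGetD pos_history j (0, 0)).1|) md) 0
    some max_dist

-- ===== PORT B =====
-- literal port of Source B: one fold carrying (min_x, max_x), updated by the two ifs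
def calculate_stride_alt (pos_history : List (Int × Int)) : Option Int :=
  if pos_history.length < 5 then none
  else
    match pos_history with
    | [] => none
    | p0 :: _ =>
      let s := pos_history.foldl
        (fun s p => (if p.1 < s.1 then p.1 else s.1, if s.2 < p.1 then p.1 else s.2))
        (p0.1, p0.1)
      some (s.2 - s.1)

-- ===== PRECONDITION & SPEC =====
def Spec_calculate_stride (pos_history : List (Int × Int)) (out : Option Int) : Prop := out = calculate_stride_alt pos_history
instance (pos_history : List (Int × Int)) (out : Option Int) : Decidable (Spec_calculate_stride pos_history out) := by unfold Spec_calculate_stride; infer_instance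

-- ===== CLAIM (what is proved, stated in full; the proofs are below) =====
def Claim_equal_calculate_stride : Prop := ∀ (pos_history : List (Int × Int)), Dom_calculate_stride pos_history → Spec_calculate_stride pos_history (calculate_stride pos_history)

-- ===== LEMMAS AND PROOFS =====

-- structural version of A's nested loop: for each head, scan the tail
def pairS : List (Int × Int) → Int → Int
  | [], acc => acc
  | p :: t, acc => pairS t (t.foldl (fun a q => max a |p.1 - q.1|) acc)

theorem foldl_max_ge_acc (f : Int × Int → Int) (l : List (Int × Int)) (acc : Int) :
    acc ≤ l.foldl (fun a q => max a (f q)) acc := by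
  induction l generalizing acc with
  | nil => simp
  | cons x t ih => exact le_trans (le_max_left _ _) (ih (max acc (f x)))

theorem foldl_max_ge_mem (f : Int × Int → Int) (l : List (Int × Int)) (acc : Int)
    (q : Int × Int) (hq : q ∈ l) : f q ≤ l.foldl (fun a p => max a (f p)) acc := by
  induction l generalizing acc with
  | nil => simp at hq
  | cons x t ih =>
    rcases List.mem_cons.mp hq with h | h
    · subst h; exact le_trans (le_max_right _ _) (foldl_max_ge_acc f t _)
    · exact ih _ h

theorem foldl_max_le (f : Int × Int → Int) (l : List (Int × Int)) (acc c : Int)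
    (hacc : acc ≤ c) (h : ∀ q ∈ l, f q ≤ c) :
    l.foldl (fun a p => max a (f p)) acc ≤ c := by
  induction l generalizing acc with
  | nil => simpa using hacc
  | cons x t ih =>
    exact ih _ (max_le hacc (h x (List.mem_cons_self))) (fun q hq => h q (List.mem_cons_of_mem _ hq))

theorem pairS_ge_acc (l : List (Int × Int)) (acc : Int) : acc ≤ pairS l acc := by
  induction l generalizing acc with
  | nil => simp [pairS]
  | cons x t ih =>
    simp only [pairS]
    exact le_trans (foldl_max_ge_acc (fun q => |x.1 - q.1|) t acc) (ih _)

theorem pairS_pair_le (l : List (Int × Int)) (acc : Int) (hacc : 0 ≤ acc)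
    (x y : Int × Int) (hx : x ∈ l) (hy : y ∈ l) : |x.1 - y.1| ≤ pairS l acc := by
  induction l generalizing acc with
  | nil => simp at hx
  | cons z t ih =>
    have hstep : 0 ≤ t.foldl (fun a q => max a |z.1 - q.1|) acc :=
      le_trans hacc (foldl_max_ge_acc _ t acc)
    simp only [pairS]
    rcases List.mem_cons.mp hx with hxz | hxt
    · rcases List.mem_cons.mp hy with hyz | hyt
      · subst hxz; subst hyz
        simpa using le_trans hstep (pairS_ge_acc t _)
      · subst hxz
        exact le_trans (foldl_max_ge_mem (fun q => |x.1 - q.1|) t acc y hyt) (pairS_ge_acc t _)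
    · rcases List.mem_cons.mp hy with hyz | hyt
      · subst hyz
        rw [abs_sub_comm]
        exact le_trans (foldl_max_ge_mem (fun q => |y.1 - q.1|) t acc x hxt) (pairS_ge_acc t _)
      · exact ih _ hstep hxt hyt

theorem pairS_le (l : List (Int × Int)) (acc c : Int) (hacc : acc ≤ c)
    (h : ∀ x ∈ l, ∀ y ∈ l, |x.1 - y.1| ≤ c) : pairS l acc ≤ c := by
  induction l generalizing acc c with
  | nil => simpa [pairS] using hacc
  | cons z t ih =>
    simp only [pairS]
    refine ih _ _ (foldl_max_le _ t acc c hacc ?_) ?_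
    · exact fun q hq => h z List.mem_cons_self q (List.mem_cons_of_mem _ hq)
    · exact fun x hx y hy => h x (List.mem_cons_of_mem _ hx) y (List.mem_cons_of_mem _ hy)

-- A's nested pyRange loop equals pairS on the dropped suffix
theorem outer_eq (ph : List (Int × Int)) :
    ∀ fuel k md, ph.length - k = fuel →
      (PySem.List.pyRange (k : Int) ph.length 1).foldl (fun md i =>
        (PySem.List.pyRange (i + 1) ph.length 1).foldl (fun md j =>
          max md |(PySem.List.pyGetD ph i (0, 0)).1 -
                  (PySem.List.pyGetD ph j (0, 0)).1|) md) md
      = pairS (ph.drop k) md := by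
  intro fuel
  induction fuel with
  | zero =>
    intro k md hk
    have hle : ph.length ≤ k := by omega
    rw [PySem.List.pyRange_one_eq_nil (by exact_mod_cast hle)]
    simp [List.drop_eq_nil_of_le hle, pairS]
  | succ m ih =>
    intro k md hk
    have hklt : k < ph.length := by omega
    rw [PySem.List.pyRange_one_cons (by exact_mod_cast hklt)]
    rw [List.foldl_cons]
    have hc : ((k : Int) + 1) = ((k + 1 : Nat) : Int) := by push_cast; ring
    have hget : PySem.List.pyGetD ph (k : Int) (0, 0) = ph[k] := by
      rw [PySem.List.pyGetD_natCast]
      exact List.getD_eq_getElem ph (0, 0) hklt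
    have hinner : ∀ md' : Int, (PySem.List.pyRange ((k : Int) + 1) ph.length 1).foldl (fun md j =>
          max md |(PySem.List.pyGetD ph (k : Int) (0, 0)).1 -
                  (PySem.List.pyGetD ph j (0, 0)).1|) md'
        = (ph.drop (k + 1)).foldl (fun a q => max a |ph[k].1 - q.1|) md' := by
      intro md'
      rw [hc, hget]
      have h := PySem.List.foldl_pyRange_pyGetD' ph (0, 0)
        (fun a q => max a |(ph[k].1 : Int) - q.1|) md'
        (show (0 : Int) ≤ ((k + 1 : Nat) : Int) by positivity)
      simpa using h
    rw [hinner]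
    have hdrop : ph.drop k = ph[k] :: ph.drop (k + 1) := List.drop_eq_getElem_cons hklt
    rw [hc, ih (k + 1) _ (by omega), hdrop]
    simp only [pairS]

-- the pair fold of B splits into independent min and max folds
theorem foldl_prod_split (l : List (Int × Int)) (a b : Int) :
    l.foldl (fun s p => (if p.1 < s.1 then p.1 else s.1, if s.2 < p.1 then p.1 else s.2)) (a, b)
    = (l.foldl (fun m p => if p.1 < m then p.1 else m) a,
       l.foldl (fun m p => if m < p.1 then p.1 else m) b) := by
  induction l generalizing a b with
  | nil => rfl
  | cons x t ih => simp only [List.foldl_cons]; exact ih _ _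

theorem foldl_min_le_acc (l : List (Int × Int)) (a : Int) :
    l.foldl (fun m p => if p.1 < m then p.1 else m) a ≤ a := by
  induction l generalizing a with
  | nil => simp
  | cons x t ih =>
    refine le_trans (ih _) ?_
    dsimp only
    split <;> omega

theorem foldl_min_le_mem (l : List (Int × Int)) (a : Int) (q : Int × Int) (hq : q ∈ l) :
    l.foldl (fun m p => if p.1 < m then p.1 else m) a ≤ q.1 := by
  induction l generalizing a with
  | nil => simp at hq
  | cons x t ih =>
    rcases List.mem_cons.mp hq with h | h
    · subst h
      refine le_trans (foldl_min_le_acc t _) ?_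
      dsimp only
      split <;> omega
    · exact ih _ h

theorem foldl_min_mem (l : List (Int × Int)) (a : Int) :
    l.foldl (fun m p => if p.1 < m then p.1 else m) a = a ∨
    ∃ q ∈ l, l.foldl (fun m p => if p.1 < m then p.1 else m) a = q.1 := by
  induction l generalizing a with
  | nil => left; rfl
  | cons x t ih =>
    simp only [List.foldl_cons]
    rcases ih (if x.1 < a then x.1 else a) with h | ⟨q, hq, h⟩
    · by_cases hx : x.1 < a
      · right; exact ⟨x, List.mem_cons_self, by simpa [hx] using h⟩
      · left; simpa [hx] using h
    · right; exact ⟨q, List.mem_cons_of_mem _ hq, h⟩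

theorem foldl_max_le_acc (l : List (Int × Int)) (a : Int) :
    a ≤ l.foldl (fun m p => if m < p.1 then p.1 else m) a := by
  induction l generalizing a with
  | nil => simp
  | cons x t ih =>
    refine le_trans ?_ (ih _)
    dsimp only
    split <;> omega

theorem foldl_max_le_mem (l : List (Int × Int)) (a : Int) (q : Int × Int) (hq : q ∈ l) :
    q.1 ≤ l.foldl (fun m p => if m < p.1 then p.1 else m) a := by
  induction l generalizing a with
  | nil => simp at hq
  | cons x t ih =>
    rcases List.mem_cons.mp hq with h | h
    · subst h
      refine le_trans ?_ (foldl_max_le_acc t _)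
      dsimp only
      split <;> omega
    · exact ih _ h

theorem foldl_max_mem (l : List (Int × Int)) (a : Int) :
    l.foldl (fun m p => if m < p.1 then p.1 else m) a = a ∨
    ∃ q ∈ l, l.foldl (fun m p => if m < p.1 then p.1 else m) a = q.1 := by
  induction l generalizing a with
  | nil => left; rfl
  | cons x t ih =>
    simp only [List.foldl_cons]
    rcases ih (if a < x.1 then x.1 else a) with h | ⟨q, hq, h⟩
    · by_cases hx : a < x.1
      · right; exact ⟨x, List.mem_cons_self, by simpa [hx] using h⟩
      · left; simpa [hx] using h
    · right; exact ⟨q, List.mem_cons_of_mem _ hq, h⟩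

-- ===== VERDICT (by name: the statement is the Claim_ definition above) =====
theorem calculate_stride_spec : Claim_equal_calculate_stride := by
  intro ph _
  unfold Spec_calculate_stride calculate_stride calculate_stride_alt
  by_cases hlen : ph.length < 5
  · simp [hlen]
  · cases ph with
    | nil => simp at hlen
    | cons p0 t =>
      rw [if_neg hlen, if_neg hlen]
      simp only []
      rw [foldl_prod_split]
      set ph := p0 :: t with hph
      set mn := ph.foldl (fun m p => if p.1 < m then p.1 else m) p0.1 with hmn
      set mx := ph.foldl (fun m p => if m < p.1 then p.1 else m) p0.1 with hmx
      have houter := outer_eq ph ph.length 0 0 (by omega)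
      simp only [Nat.cast_zero, List.drop_zero] at houter
      rw [houter]
      congr 1
      have hp0 : p0 ∈ ph := by rw [hph]; exact List.mem_cons_self
      have hmnle : ∀ q ∈ ph, mn ≤ q.1 := fun q hq => foldl_min_le_mem ph p0.1 q hq
      have hmxge : ∀ q ∈ ph, q.1 ≤ mx := fun q hq => foldl_max_le_mem ph p0.1 q hq
      have hmnmx : mn ≤ mx := le_trans (hmnle p0 hp0) (hmxge p0 hp0)
      have hmnmem : ∃ q ∈ ph, mn = q.1 := by
        rcases foldl_min_mem ph p0.1 with h | h
        · exact ⟨p0, hp0, h⟩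
        · exact h
      have hmxmem : ∃ q ∈ ph, mx = q.1 := by
        rcases foldl_max_mem ph p0.1 with h | h
        · exact ⟨p0, hp0, h⟩
        · exact h
      apply le_antisymm
      · refine pairS_le ph 0 (mx - mn) (by omega) ?_
        intro x hx y hy
        have h1 := hmnle x hx; have h2 := hmxge x hx
        have h3 := hmnle y hy; have h4 := hmxge y hy
        rw [abs_sub_le_iff]; omega
      · obtain ⟨qmx, hqmx, hemx⟩ := hmxmem
        obtain ⟨qmn, hqmn, hemn⟩ := hmnmem
        have hle := pairS_pair_le ph 0 le_rfl qmx qmn hqmx hqmn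
        have habs : |qmx.1 - qmn.1| = mx - mn := by
          rw [← hemx, ← hemn, abs_of_nonneg (by omega)]
        omega
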